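-- pv_equiv track=rewrite | github.com/hhunna/tetris | tetris.py | detecter_piece
-- ===== SOURCE A (Python) =====
-- def detecter_piece(plateau, ignore=None):
--
--     couleur = None
--     piece = set()
--     ignore = ignore or set()
--     for i in range(len(plateau)):
--         for j in range(len(plateau[0])):
--             if (i, j) not in ignore and plateau[i][j] != 0:
--                 if plateau[i][j] == couleur or couleur is None:
--                     couleur = plateau[i][j]
--                     piece.add((i,j))
--                     if len(piece) >= 4:
--                         return piece, couleur
--     return None, None
-- ===== SOURCE B (Python) =====
-- def _cells(plateau, ignore):
--     """Yield ((i, j), value) for every non-ignored cell, row-major,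
--     using the first row's width for every row (as the board contract demands)."""
--     for i in range(len(plateau)):
--         for j in range(len(plateau[0])):
--             if (i, j) not in ignore:
--                 yield (i, j), plateau[i][j]
--
--
-- def detecter_piece(plateau, ignore=None):
--     ignore = ignore or set()
--     # Phase 1: colour of the first non-zero visible cell, if any.
--     couleur = next((v for _, v in _cells(plateau, ignore) if v != 0), None)
--     if couleur is None:
--         return None, None
--     # Phase 2: rescan, collecting cells of that colour, stopping at 4.
--     piece = set()
--     for pos, v in _cells(plateau, ignore):
--         if v == couleur:
--             piece.add(pos)
--             if len(piece) >= 4: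
--                 return piece, couleur
--     return None, None
-- ===== Notes on version B (the rewrite author's own statement) =====
-- stated objective: simpler
-- what changed: A threads a couleur/piece state pair through one scan; B decomposes into two stateless passes: find the first non-zero non-ignored cell's colour, then rescan collecting cells of exactly that colour until 4.
import Mathlib
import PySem

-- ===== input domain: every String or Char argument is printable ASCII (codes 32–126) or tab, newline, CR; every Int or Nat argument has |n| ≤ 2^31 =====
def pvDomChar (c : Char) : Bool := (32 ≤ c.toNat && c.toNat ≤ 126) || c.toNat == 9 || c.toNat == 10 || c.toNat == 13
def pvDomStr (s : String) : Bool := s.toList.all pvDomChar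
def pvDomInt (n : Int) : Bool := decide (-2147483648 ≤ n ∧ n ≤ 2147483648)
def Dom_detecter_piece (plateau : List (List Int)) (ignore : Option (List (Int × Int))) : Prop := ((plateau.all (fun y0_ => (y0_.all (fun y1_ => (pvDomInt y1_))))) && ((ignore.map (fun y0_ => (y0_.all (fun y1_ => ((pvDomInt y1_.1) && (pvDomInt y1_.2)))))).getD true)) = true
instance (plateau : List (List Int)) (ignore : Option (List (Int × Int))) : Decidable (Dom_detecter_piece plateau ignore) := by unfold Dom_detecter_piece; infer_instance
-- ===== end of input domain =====

-- B replaces A's single stateful scan by two stateless passes (find the colour, then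
-- collect its cells): same result, simpler decomposition. Equality of return values
-- is proved on Pre_ (exactly the inputs on which A returns rather than raising);
-- neither program mutates its arguments.

-- ===== PORT A =====
-- cell access plateau[i][j] (total form, default 0; exact wherever A returns a value,
-- because A's scan either stays in range or returns before its first out-of-range access)
def pvCell (plateau : List (List Int)) (i j : Nat) : Int :=
  (plateau.getD i []).getD j 0

-- inner `for j in range(len(plateau[0]))` loop of A, threading (couleur, piece);
-- .inl = the early `return piece, couleur`, .inr = fall through with updated state
def pvAInner (plateau : List (List Int)) (ig : List (Int × Int)) (i : Nat) :
    List Nat → Option Int → List (Int × Int) →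
    Sum (List (Int × Int) × Int) (Option Int × List (Int × Int))
  | [], c, p => .inr (c, p)
  | j :: js, c, p =>
    let v := pvCell plateau i j
    if ¬ ig.contains ((i : Int), (j : Int)) ∧ v ≠ 0 then
      if c = some v ∨ c = none then
        let p' := PySem.Set.add p ((i : Int), (j : Int))
        if 4 ≤ p'.length then .inl (p', v)
        else pvAInner plateau ig i js (some v) p'
      else pvAInner plateau ig i js c p
    else pvAInner plateau ig i js c p

-- outer `for i in range(len(plateau))` loop of A
def pvAOuter (plateau : List (List Int)) (ig : List (Int × Int)) (w : Nat) :
    List Nat → Option Int → List (Int × Int) →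
    (Option (List (Int × Int))) × Option Int
  | [], _, _ => (none, none)
  | i :: is, c, p =>
    match pvAInner plateau ig i (List.range w) c p with
    | .inl (pc, col) => (some pc, some col)
    | .inr (c', p') => pvAOuter plateau ig w is c' p'

def detecter_piece (plateau : List (List Int)) (ignore : Option (List (Int × Int))) :
    (Option (List (Int × Int))) × Option Int :=
  let ig := ignore.getD []      -- `ignore = ignore or set()` (None/empty → empty set)
  let w := (plateau.headD []).length
  pvAOuter plateau ig w (List.range plateau.length) none []

-- ===== PORT B =====
-- phase 1 inner loop: first non-ignored non-zero cell of row i, if any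
def pvBRowFind (plateau : List (List Int)) (ig : List (Int × Int)) (i : Nat) :
    List Nat → Option Int
  | [] => none
  | j :: js =>
    let v := pvCell plateau i j
    if ¬ ig.contains ((i : Int), (j : Int)) ∧ v ≠ 0 then some v
    else pvBRowFind plateau ig i js

-- phase 1 outer loop
def pvBFindCol (plateau : List (List Int)) (ig : List (Int × Int)) (w : Nat) :
    List Nat → Option Int
  | [] => none
  | i :: is =>
    match pvBRowFind plateau ig i (List.range w) with
    | some c => some c
    | none => pvBFindCol plateau ig w is

-- phase 2 inner loop: collect cells of colour `col` in row i, early return at 4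
def pvBCollectRow (plateau : List (List Int)) (ig : List (Int × Int)) (i : Nat) (col : Int) :
    List Nat → List (Int × Int) →
    Sum (List (Int × Int)) (List (Int × Int))
  | [], p => .inr p
  | j :: js, p =>
    let v := pvCell plateau i j
    if ¬ ig.contains ((i : Int), (j : Int)) ∧ v = col then
      let p' := PySem.Set.add p ((i : Int), (j : Int))
      if 4 ≤ p'.length then .inl p'
      else pvBCollectRow plateau ig i col js p'
    else pvBCollectRow plateau ig i col js p

-- phase 2 outer loop
def pvBCollect (plateau : List (List Int)) (ig : List (Int × Int)) (w : Nat) (col : Int) :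
    List Nat → List (Int × Int) →
    (Option (List (Int × Int))) × Option Int
  | [], _ => (none, none)
  | i :: is, p =>
    match pvBCollectRow plateau ig i col (List.range w) p with
    | .inl pc => (some pc, some col)
    | .inr p' => pvBCollect plateau ig w col is p'

def detecter_piece_alt (plateau : List (List Int)) (ignore : Option (List (Int × Int))) :
    (Option (List (Int × Int))) × Option Int :=
  let ig := ignore.getD []
  let w := (plateau.headD []).length
  match pvBFindCol plateau ig w (List.range plateau.length) with
  | none => (none, none)
  | some col => pvBCollect plateau ig w col (List.range plateau.length) []

-- ===== PRECONDITION & SPEC =====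
-- Pre_ excludes EXACTLY the inputs on which A raises IndexError: boards whose first
-- out-of-range, non-ignored cell in row-major order (width = first row's length) is
-- reached before the scan has found 4 cells of the first visible non-zero colour.
-- Every input on which A returns a value satisfies Pre_.
def Pre_detecter_piece (plateau : List (List Int)) (ignore : Option (List (Int × Int))) : Prop :=
  (let ig := ignore.getD []
   let w := (plateau.headD []).length
   let cells := (List.range plateau.length).flatMap
     (fun i => (List.range w).map (fun j => (i, j)))
   let pfx := cells.takeWhile (fun ij =>
     !(decide ((plateau.getD ij.1 []).length ≤ ij.2) &&
       !ig.contains ((ij.1 : Int), (ij.2 : Int))))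
   if pfx.length = cells.length then true
   else
     let vis := (pfx.filter (fun ij => !ig.contains ((ij.1 : Int), (ij.2 : Int)))).map
       (fun ij => (plateau.getD ij.1 []).getD ij.2 0)
     match (vis.filter (fun v => v != 0)).head? with
     | none => false
     | some c => decide (4 ≤ (vis.filter (fun v => v == c)).length)) = true
instance (plateau : List (List Int)) (ignore : Option (List (Int × Int))) : Decidable (Pre_detecter_piece plateau ignore) := by unfold Pre_detecter_piece; infer_instance
def pvWitness_detecter_piece : List (List Int) × (Option (List (Int × Int))) :=
  ([[1, 2, 0], [0, 2, 2], [0, 2, 0]], some [(0, 0)])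

def Spec_detecter_piece (plateau : List (List Int)) (ignore : Option (List (Int × Int))) (out : (Option (List (Int × Int))) × Option Int) : Prop := out = detecter_piece_alt plateau ignore
instance (plateau : List (List Int)) (ignore : Option (List (Int × Int))) (out : (Option (List (Int × Int))) × Option Int) : Decidable (Spec_detecter_piece plateau ignore out) := by unfold Spec_detecter_piece; infer_instance

-- ===== CLAIM (what is proved, stated in full; the proofs are below) =====
def Claim_equal_detecter_piece : Prop := ∀ (plateau : List (List Int)) (ignore : Option (List (Int × Int))), Dom_detecter_piece plateau ignore → Pre_detecter_piece plateau ignore → Spec_detecter_piece plateau ignore (detecter_piece plateau ignore)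

-- ===== LEMMAS AND PROOFS =====
-- rowFind only ever returns a non-zero value
theorem pvBRowFind_ne_zero (plateau : List (List Int)) (ig : List (Int × Int)) (i : Nat) :
    ∀ (js : List Nat) (col : Int), pvBRowFind plateau ig i js = some col → col ≠ 0 := by
  intro js
  induction js with
  | nil => intro col h; simp [pvBRowFind] at h
  | cons j js ih =>
    intro col h
    rw [pvBRowFind] at h
    split at h
    · rename_i hc; cases h; exact hc.2
    · exact ih col h

theorem pvBFindCol_ne_zero (plateau : List (List Int)) (ig : List (Int × Int)) (w : Nat) :
    ∀ (is : List Nat) (col : Int), pvBFindCol plateau ig w is = some col → col ≠ 0 := by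
  intro is
  induction is with
  | nil => intro col h; simp [pvBFindCol] at h
  | cons i is ih =>
    intro col h
    rw [pvBFindCol] at h
    cases hrf : pvBRowFind plateau ig i (List.range w) with
    | none => rw [hrf] at h; exact ih col h
    | some c => rw [hrf] at h; cases h; exact pvBRowFind_ne_zero plateau ig i _ _ hrf

-- a row in which phase 1 finds nothing contributes nothing to phase 2 either
theorem pvBCollectRow_skip (plateau : List (List Int)) (ig : List (Int × Int)) (i : Nat)
    (col : Int) (hcol : col ≠ 0) :
    ∀ (js : List Nat) (p : List (Int × Int)),
      pvBRowFind plateau ig i js = none → pvBCollectRow plateau ig i col js p = .inr p := by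
  intro js
  induction js with
  | nil => intro p _; rfl
  | cons j js ih =>
    intro p h
    rw [pvBRowFind] at h
    split at h
    · cases h
    · rename_i hc
      rw [pvBCollectRow, if_neg, ih p h]
      rintro ⟨h1, h2⟩
      rcases not_and_or.mp hc with h3 | h3
      · exact h3 h1
      · exact hcol (h2 ▸ not_not.mp h3)

-- Once the colour is fixed (c = some col with col ≠ 0), A's remaining scan of a row is
-- exactly B's phase-2 row scan.
theorem pvAInner_some (plateau : List (List Int)) (ig : List (Int × Int)) (i : Nat)
    (col : Int) (hcol : col ≠ 0) :
    ∀ (js : List Nat) (p : List (Int × Int)),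
      pvAInner plateau ig i js (some col) p =
        (match pvBCollectRow plateau ig i col js p with
         | .inl pc => .inl (pc, col)
         | .inr p' => .inr (some col, p')) := by
  intro js
  induction js with
  | nil => intro p; rfl
  | cons j js ih =>
    intro p
    rw [pvAInner, pvBCollectRow]
    by_cases hig : ig.contains ((i : Int), (j : Int)) = true
    · rw [if_neg (fun hh => hh.1 hig), if_neg (fun hh => hh.1 hig)]
      exact ih p
    · by_cases hv : pvCell plateau i j = col
      · have hz : ¬ pvCell plateau i j = 0 := fun h0 => hcol (hv.symm.trans h0)
        rw [if_pos ⟨hig, hz⟩, if_pos (Or.inl (congrArg some hv.symm)), hv]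
        by_cases hlen : 4 ≤ (PySem.Set.add p ((i : Int), (j : Int))).length
        · rw [if_pos hlen, if_pos ⟨hig, rfl⟩, if_pos hlen]
        · rw [if_neg hlen, if_pos ⟨hig, rfl⟩, if_neg hlen]; exact ih _
      · by_cases hz : pvCell plateau i j = 0
        · rw [if_neg (fun hh => hh.2 hz), if_neg (fun hh => hv hh.2)]
          exact ih p
        · rw [if_pos ⟨hig, hz⟩, if_neg, if_neg (fun hh => hv hh.2)]
          · exact ih p
          · rintro (hh | hh)
            · exact hv (Option.some.inj hh).symm
            · cases hh

-- and therefore row by row: A's remaining scan equals B's phase-2 scan.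
theorem pvAOuter_some (plateau : List (List Int)) (ig : List (Int × Int)) (w : Nat)
    (col : Int) (hcol : col ≠ 0) :
    ∀ (is : List Nat) (p : List (Int × Int)),
      pvAOuter plateau ig w is (some col) p = pvBCollect plateau ig w col is p := by
  intro is
  induction is with
  | nil => intro p; rfl
  | cons i is ih =>
    intro p
    rw [pvAOuter, pvBCollect, pvAInner_some plateau ig i col hcol]
    cases pvBCollectRow plateau ig i col (List.range w) p with
    | inl pc => rfl
    | inr p' => exact ih p'

-- Before the colour is fixed, A's row scan skips exactly the cells B's phase-1 row
-- scan skips; at the first qualifying cell both seed the same state, and from there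
-- A's scan is B's phase-2 scan (pvAInner_some).
theorem pvAInner_none (plateau : List (List Int)) (ig : List (Int × Int)) (i : Nat) :
    ∀ (js : List Nat),
      (match pvBRowFind plateau ig i js with
       | none => pvAInner plateau ig i js none [] = .inr (none, [])
       | some col =>
           pvAInner plateau ig i js none [] =
             (match pvBCollectRow plateau ig i col js [] with
              | .inl pc => Sum.inl (pc, col)
              | .inr p' => Sum.inr (some col, p')) : Prop) := by
  intro js
  induction js with
  | nil => simp [pvAInner, pvBRowFind]
  | cons j js ih =>
    by_cases hq : ¬ ig.contains ((i : Int), (j : Int)) = true ∧ ¬ pvCell plateau i j = 0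
    · -- first qualifying cell: both seed (some v, [(i,j)]) and continue
      rw [pvBRowFind, if_pos hq]
      have hadd : PySem.Set.add ([] : List (Int × Int)) ((i : Int), (j : Int))
          = [((i : Int), (j : Int))] := rfl
      rw [pvAInner, if_pos hq, if_pos (Or.inr rfl), hadd, if_neg (by simp)]
      simp only [pvBCollectRow]
      rw [if_pos ⟨hq.1, trivial⟩, hadd, if_neg (by simp)]
      exact pvAInner_some plateau ig i (pvCell plateau i j) hq.2 js
        [((i : Int), (j : Int))]
    · -- ignored or zero cell: all three scans skip it
      cases hrf : pvBRowFind plateau ig i js with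
      | none =>
        rw [pvBRowFind, if_neg hq, hrf]
        rw [hrf] at ih
        rw [pvAInner, if_neg hq]
        exact ih
      | some col =>
        have hcol := pvBRowFind_ne_zero plateau ig i js col hrf
        rw [pvBRowFind, if_neg hq, hrf]
        rw [hrf] at ih
        rw [pvAInner, if_neg hq]
        simp only [pvBCollectRow]
        rw [if_neg]
        · exact ih
        · rintro ⟨h1, h2⟩
          rcases not_and_or.mp hq with h3 | h3
          · exact h3 h1
          · exact hcol (h2 ▸ not_not.mp h3)

-- row by row, same statement for the whole board
theorem pvAOuter_none (plateau : List (List Int)) (ig : List (Int × Int)) (w : Nat) :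
    ∀ (is : List Nat),
      pvAOuter plateau ig w is none [] =
        (match pvBFindCol plateau ig w is with
         | none => (none, none)
         | some col => pvBCollect plateau ig w col is []) := by
  intro is
  induction is with
  | nil => rfl
  | cons i is ih =>
    have h := pvAInner_none plateau ig i (List.range w)
    cases hrf : pvBRowFind plateau ig i (List.range w) with
    | none =>
      rw [hrf] at h
      rw [pvAOuter, h, pvBFindCol, hrf]
      cases hfc : pvBFindCol plateau ig w is with
      | none =>
        rw [hfc] at ih
        exact ih
      | some col =>
        have hcol := pvBFindCol_ne_zero plateau ig w is col hfc
        have hskip : pvBCollect plateau ig w col (i :: is) [] =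
            pvBCollect plateau ig w col is [] := by
          rw [pvBCollect, pvBCollectRow_skip plateau ig i col hcol _ _ hrf]
        rw [hfc] at ih
        exact ih.trans hskip.symm
    | some col =>
      have hcol := pvBRowFind_ne_zero plateau ig i _ col hrf
      rw [hrf] at h
      rw [pvAOuter, h, pvBFindCol, hrf]
      simp only [pvBCollect]
      cases hcr : pvBCollectRow plateau ig i col (List.range w) [] with
      | inl pc => rfl
      | inr p' => exact pvAOuter_some plateau ig w col hcol is p'

-- ===== VERDICT (by name: the statement is the Claim_ definition above) =====
theorem detecter_piece_spec : Claim_equal_detecter_piece := by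
  intro plateau ignore _ _
  unfold Spec_detecter_piece detecter_piece detecter_piece_alt
  rw [pvAOuter_none]
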